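-- pv_equiv track=rewrite | github.com/txloc1909/luatable | src/luatable/_table.py | _optimal_array_size
-- ===== SOURCE A (Python) =====
-- def _optimal_array_size(buckets: list[int]) -> int:
--     optimal: int = 0
--     cum_sum: int = 0
--     for i, count in enumerate(buckets, start=1):
--         cum_sum += count
--         if cum_sum >= 2**(i-1):
--             optimal = 2**i
--     return optimal
-- ===== SOURCE B (Python) =====
-- def _optimal_array_size(buckets: list[int]) -> int:
--     # pass 1: prefix sums table
--     cum = []
--     total = 0
--     for c in buckets:
--         total += c
--         cum.append(total)
--     # pass 2: all 1-based indices whose prefix sum reaches the threshold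
--     candidates = [i for i in range(1, len(cum) + 1) if cum[i - 1] >= 2 ** (i - 1)]
--     # pass 3: the largest qualifying index decides the size
--     return 2 ** max(candidates) if candidates else 0
-- ===== Notes on version B (the rewrite author's own statement) =====
-- stated objective: alternative
-- what changed: Replaces A's single fused loop with running overwrite state by three separate passes: build the prefix-sum table, filter the qualifying 1-based indices, then return 2**max of the candidates (0 if none).
import Mathlib
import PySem

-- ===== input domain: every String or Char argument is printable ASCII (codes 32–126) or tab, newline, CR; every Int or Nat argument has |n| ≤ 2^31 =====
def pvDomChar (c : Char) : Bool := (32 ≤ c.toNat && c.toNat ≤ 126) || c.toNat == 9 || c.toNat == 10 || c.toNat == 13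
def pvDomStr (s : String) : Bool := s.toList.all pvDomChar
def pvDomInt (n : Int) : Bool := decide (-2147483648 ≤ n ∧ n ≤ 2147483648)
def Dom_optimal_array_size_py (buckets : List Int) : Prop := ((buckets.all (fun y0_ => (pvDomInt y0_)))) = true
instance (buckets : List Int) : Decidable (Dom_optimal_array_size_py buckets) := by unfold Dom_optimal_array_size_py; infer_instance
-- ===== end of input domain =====

-- B replaces A's single fused overwrite loop by three passes (prefix-sum table, index filter, max); alternative decomposition, same cost.

-- ===== PORT A =====
-- state: (optimal, cum_sum, i); enumerate(buckets, start=1) carried as the counter i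
def optimal_array_size_py (buckets : List Int) : Int :=
  (buckets.foldl
    (fun (st : Int × Int × Nat) count =>
      let cum_sum := st.2.1 + count
      let i := st.2.2
      ((if cum_sum ≥ (2:Int) ^ (i - 1) then (2:Int) ^ i else st.1), cum_sum, i + 1))
    (0, 0, 1)).1

-- ===== PORT B =====
def optimal_array_size_py_alt (buckets : List Int) : Int :=
  -- pass 1: prefix-sum table (loop appending the running total)
  let cum : List Int :=
    (buckets.foldl (fun (st : List Int × Int) c => (st.1 ++ [st.2 + c], st.2 + c)) ([], 0)).1
  -- pass 2: qualifying 1-based indices (cum[i-1] is in range for every i produced by range)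
  let candidates : List Nat :=
    (List.range' 1 cum.length).filter (fun i => decide (cum.getD (i - 1) 0 ≥ (2:Int) ^ (i - 1)))
  -- pass 3: 2**max(candidates) if candidates else 0
  match candidates.max? with
  | some m => (2:Int) ^ m
  | none => 0

-- ===== PRECONDITION & SPEC =====
def Spec_optimal_array_size_py (buckets : List Int) (out : Int) : Prop := out = optimal_array_size_py_alt buckets
instance (buckets : List Int) (out : Int) : Decidable (Spec_optimal_array_size_py buckets out) := by unfold Spec_optimal_array_size_py; infer_instance

-- ===== CLAIM (what is proved, stated in full; the proofs are below) =====
def Claim_equal_optimal_array_size_py : Prop := ∀ (buckets : List Int), Dom_optimal_array_size_py buckets → Spec_optimal_array_size_py buckets (optimal_array_size_py buckets)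

-- ===== LEMMAS AND PROOFS =====

-- the prefix-sum table, structurally
def pvCums (t : Int) : List Int → List Int
  | [] => []
  | c :: r => (t + c) :: pvCums (t + c) r

theorem pvCums_length (bs : List Int) : ∀ t : Int, (pvCums t bs).length = bs.length := by
  induction bs with
  | nil => intro t; rfl
  | cons c r ih => intro t; simp [pvCums, ih]

theorem pvCums_concat (bs : List Int) : ∀ (t c : Int),
    pvCums t (bs ++ [c]) = pvCums t bs ++ [t + bs.sum + c] := by
  induction bs with
  | nil => intro t c; simp [pvCums]
  | cons a r ih => intro t c; simp [pvCums, ih, add_assoc]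

theorem pvFold_cums (bs : List Int) : ∀ (acc : List Int) (t : Int),
    bs.foldl (fun (st : List Int × Int) c => (st.1 ++ [st.2 + c], st.2 + c)) (acc, t)
      = (acc ++ pvCums t bs, t + bs.sum) := by
  induction bs with
  | nil => intro acc t; simp [pvCums]
  | cons c r ih => intro acc t; simp [pvCums, ih, add_assoc]

theorem pvMax?_concat_of_le (l : List Nat) (k : Nat) (h : ∀ a ∈ l, a ≤ k) :
    (l ++ [k]).max? = some k := by
  induction l with
  | nil => rfl
  | cons a r ih =>
    have ha : a ≤ k := h a (by simp)
    have := ih (fun b hb => h b (by simp [hb]))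
    rcases hr : (r ++ [k]).max? with _ | m
    · simp [List.max?_eq_none_iff] at hr
    · rw [hr] at this
      obtain rfl : m = k := by exact Option.some.injEq .. ▸ this
      simp [List.cons_append, hr, Nat.max_eq_right ha]

-- B on a list extended by one element
theorem pvAlt_concat (bs : List Int) (c : Int) :
    optimal_array_size_py_alt (bs ++ [c])
      = if bs.sum + c ≥ (2:Int) ^ bs.length then (2:Int) ^ (bs.length + 1)
        else optimal_array_size_py_alt bs := by
  unfold optimal_array_size_py_alt
  rw [pvFold_cums, pvFold_cums]
  simp only [List.nil_append, pvCums_concat, zero_add]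
  have hlen : (pvCums 0 bs).length = bs.length := pvCums_length bs 0
  have hlen' : (pvCums 0 bs ++ [bs.sum + c]).length = bs.length + 1 := by simp [hlen]
  rw [hlen, hlen']
  rw [show List.range' 1 (bs.length + 1) = List.range' 1 bs.length ++ [1 + bs.length] from by
    rw [List.range'_1_concat]]
  rw [List.filter_append]
  have hfilt : (List.range' 1 bs.length).filter
        (fun i => decide ((pvCums 0 bs ++ [bs.sum + c]).getD (i - 1) 0 ≥ (2:Int) ^ (i - 1)))
      = (List.range' 1 bs.length).filter
        (fun i => decide ((pvCums 0 bs).getD (i - 1) 0 ≥ (2:Int) ^ (i - 1))) := by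
    apply List.filter_congr
    intro i hi
    have h1 : 1 ≤ i ∧ i < 1 + bs.length := by
      have := List.mem_range'_1.mp hi; omega
    have hlt : i - 1 < (pvCums 0 bs).length := by rw [hlen]; omega
    rw [List.getD_append _ _ _ _ hlt]
  rw [hfilt]
  have hidx : (1 + bs.length) - 1 = bs.length := by omega
  have hget : (pvCums 0 bs ++ [bs.sum + c]).getD ((1 + bs.length) - 1) 0 = bs.sum + c := by
    rw [hidx, List.getD_eq_getElem?_getD]
    rw [show (pvCums 0 bs ++ [bs.sum + c])[bs.length]? = some (bs.sum + c) from by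
      rw [← hlen]; exact List.getElem?_concat_length]
    rfl
  by_cases hcond : bs.sum + c ≥ (2:Int) ^ bs.length
  · rw [if_pos hcond]
    have : [1 + bs.length].filter
          (fun i => decide ((pvCums 0 bs ++ [bs.sum + c]).getD (i - 1) 0 ≥ (2:Int) ^ (i - 1)))
        = [1 + bs.length] := by
      simp only [List.filter_cons, List.filter_nil]
      rw [if_pos]
      simp only [hidx] at hget ⊢
      rw [hget]
      simpa using hcond
    rw [this]
    rw [pvMax?_concat_of_le _ _ (by
      intro a ha
      have := List.mem_range'_1.mp (List.mem_of_mem_filter ha)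
      omega)]
    rw [show 1 + bs.length = bs.length + 1 from by omega]
  · rw [if_neg hcond]
    have : [1 + bs.length].filter
          (fun i => decide ((pvCums 0 bs ++ [bs.sum + c]).getD (i - 1) 0 ≥ (2:Int) ^ (i - 1)))
        = [] := by
      simp only [List.filter_cons, List.filter_nil]
      rw [if_neg]
      simp only [hidx] at hget ⊢
      rw [hget]
      simpa using hcond
    rw [this, List.append_nil]
    rfl

-- A's fold state after processing bs
theorem pvFoldA (bs : List Int) :
    bs.foldl
      (fun (st : Int × Int × Nat) count =>
        let cum_sum := st.2.1 + count
        let i := st.2.2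
        ((if cum_sum ≥ (2:Int) ^ (i - 1) then (2:Int) ^ i else st.1), cum_sum, i + 1))
      (0, 0, 1)
      = (optimal_array_size_py_alt bs, bs.sum, bs.length + 1) := by
  induction bs using List.reverseRecOn with
  | nil => simp [optimal_array_size_py_alt]
  | append_singleton bs c ih =>
    rw [List.foldl_append, ih]
    simp only [List.foldl_cons, List.foldl_nil]
    rw [pvAlt_concat]
    by_cases hcond : bs.sum + c ≥ (2:Int) ^ bs.length
    · simp only [Nat.add_sub_cancel, if_pos hcond]
      simp [List.sum_append]
    · simp only [Nat.add_sub_cancel, if_neg hcond]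
      simp only [List.sum_append, List.sum_cons, List.sum_nil, add_zero, List.length_append,
        List.length_cons, List.length_nil]

-- ===== VERDICT (by name: the statement is the Claim_ definition above) =====
theorem optimal_array_size_py_spec : Claim_equal_optimal_array_size_py := by
  intro buckets _
  unfold Spec_optimal_array_size_py optimal_array_size_py
  rw [pvFoldA]
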